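-- pv_equiv track=rewrite | github.com/denhur62/Python-Algorithm | programmers/PCCP/PCCP 모의고사 1번.py | solution
-- ===== SOURCE A (Python) =====
-- from collections import defaultdict
--
-- def solution(input_string):
--     sequence = input_string[0]
--     dic = defaultdict(int)
--     answer = set()
--     for i in input_string:
--         if dic[i]==0:
--             dic[i]+=1
--         elif dic[i]!=0 and sequence !=i:
--             answer.add(i)
--         sequence = i
--     answer= list(answer)
--     answer.sort()
--     answer = "".join(answer)
--
--     return answer if answer else "N"
-- ===== SOURCE B (Python) =====
-- from collections import Counter
--
-- def solution(input_string):
--     # run-length compress the string, then keep characters occurring in >= 2 runs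
--     prev = input_string[0]
--     runs = [prev]
--     for c in input_string[1:]:
--         if c != prev:
--             runs.append(c)
--             prev = c
--     cnt = Counter(runs)
--     res = "".join(sorted(ch for ch in cnt if cnt[ch] >= 2))
--     return res if res else "N"
-- ===== Notes on version B (the rewrite author's own statement) =====
-- stated objective: alternative
-- what changed: Replaces A's seen-dict-plus-previous-char scan over every character with a run-length-compression pass followed by a Counter threshold (keep characters occurring in >= 2 runs), sorted and joined.
import Mathlib
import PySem

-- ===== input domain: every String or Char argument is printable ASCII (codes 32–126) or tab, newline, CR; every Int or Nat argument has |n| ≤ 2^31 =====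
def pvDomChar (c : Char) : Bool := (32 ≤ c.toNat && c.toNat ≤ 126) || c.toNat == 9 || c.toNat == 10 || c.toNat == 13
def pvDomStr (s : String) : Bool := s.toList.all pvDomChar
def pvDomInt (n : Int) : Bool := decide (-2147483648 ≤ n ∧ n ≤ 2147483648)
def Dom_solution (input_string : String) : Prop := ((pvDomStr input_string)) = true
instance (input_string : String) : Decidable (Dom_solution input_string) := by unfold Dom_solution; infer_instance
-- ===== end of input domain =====

-- B replaces A's seen-dict-plus-previous-char scan with run-length compression followed by
-- a Counter threshold (characters occurring in >= 2 runs), sorted and joined; same cost.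

-- ===== PORT A =====
-- one loop step of A: state = (sequence, dic, answer); 'dic[i]' of the defaultdict(int) is
-- dic.getD i 0 (the implicitly-inserted 0 entry is never observed other than via getD _ 0)
def solutionStepA (st : Char × PySem.Dict Char Int × PySem.Set Char) (i : Char) :
    Char × PySem.Dict Char Int × PySem.Set Char :=
  if st.2.1.getD i 0 = 0 then (i, st.2.1.insert i (st.2.1.getD i 0 + 1), st.2.2)
  else if st.2.1.getD i 0 ≠ 0 ∧ st.1 ≠ i then (i, st.2.1, PySem.Set.add st.2.2 i)
  else (i, st.2.1, st.2.2)

def solution (input_string : String) : String :=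
  -- input_string[0] raises IndexError on ""; Pre_solution excludes it, the port returns "" there
  match input_string.toList with
  | [] => ""
  | c0 :: cs =>
    let st := (c0 :: cs).foldl solutionStepA (c0, PySem.Dict.empty, PySem.Set.empty)
    -- answer = list(answer); answer.sort(); "".join(answer)
    let answer := String.ofList (PySem.List.sorted st.2.2 (fun x => x) false)
    if answer = "" then "N" else answer

-- ===== PORT B =====
-- one loop step of B: state = (prev, runs)
def solutionStepB (st : Char × List Char) (c : Char) : Char × List Char :=
  if c ≠ st.1 then (c, st.2 ++ [c]) else st

def solution_alt (input_string : String) : String :=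
  -- input_string[0] raises IndexError on ""; Pre_solution excludes it, the port returns "" there
  match input_string.toList with
  | [] => ""
  | c0 :: cs =>
    let runs := (cs.foldl solutionStepB (c0, [c0])).2   -- cs = input_string[1:]
    let cnt := PySem.Dict.counter runs
    let res := String.ofList (PySem.List.sorted
      ((PySem.Dict.keys cnt).filter (fun ch => 2 ≤ cnt.getD ch 0)) (fun x => x) false)
    if res = "" then "N" else res

-- ===== PRECONDITION & SPEC =====
-- Pre_ excludes only the empty string, on which A (and B) raise IndexError at input_string[0]
def Pre_solution (input_string : String) : Prop := input_string ≠ ""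
instance (input_string : String) : Decidable (Pre_solution input_string) := by
  unfold Pre_solution; infer_instance
def pvWitness_solution : String := "aabcbac"

def Spec_solution (input_string : String) (out : String) : Prop := out = solution_alt input_string
instance (input_string : String) (out : String) : Decidable (Spec_solution input_string out) := by
  unfold Spec_solution; infer_instance

-- ===== CLAIM (what is proved, stated in full; the proofs are below) =====
def Claim_equal_solution : Prop := ∀ (input_string : String), Dom_solution input_string →
  Pre_solution input_string → Spec_solution input_string (solution input_string)

-- ===== LEMMAS AND PROOFS =====

-- run-length compression of a tail given the previous character
def rlGo (prev : Char) : List Char → List Char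
  | [] => []
  | c :: cs => if c = prev then rlGo prev cs else c :: rlGo c cs

-- B's loop computes the compression
lemma stepB_eq (rest : List Char) : ∀ (prev : Char) (acc : List Char),
    (rest.foldl solutionStepB (prev, acc)).2 = acc ++ rlGo prev rest := by
  induction rest with
  | nil => intro prev acc; simp [rlGo]
  | cons c cs ih =>
    intro prev acc
    by_cases h : c = prev
    · simp [solutionStepB, h, rlGo, ih]
    · simp [solutionStepB, h, rlGo, ih, List.append_assoc]

-- A's loop invariant: answer collects exactly the characters with ≥ 2 runs so far
lemma stepA_inv (rest : List Char) : ∀ (prev : Char) (dic : PySem.Dict Char Int)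
    (ans : PySem.Set Char) (R : List Char),
    1 ≤ R.count prev →
    (∀ c, dic.getD c 0 ≠ 0 ↔ 1 ≤ R.count c) →
    ans.Nodup →
    (∀ c, c ∈ ans ↔ 2 ≤ R.count c) →
    (rest.foldl solutionStepA (prev, dic, ans)).2.2.Nodup ∧
      ∀ c, c ∈ (rest.foldl solutionStepA (prev, dic, ans)).2.2 ↔
        2 ≤ (R ++ rlGo prev rest).count c := by
  induction rest with
  | nil =>
    intro prev dic ans R _ _ hnd hans
    simpa [rlGo] using ⟨hnd, hans⟩
  | cons c cs ih =>
    intro prev dic ans R hprev hdic hnd hans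
    by_cases h0 : dic.getD c 0 = 0
    · -- first time c is seen: it starts a new run (c ≠ prev since prev was seen)
      have hcR : R.count c = 0 := by
        by_contra hne
        exact (hdic c).mpr (by omega) h0
      have hcp : c ≠ prev := by
        intro h; rw [h] at hcR; omega
      have step : solutionStepA (prev, dic, ans) c =
          (c, dic.insert c (dic.getD c 0 + 1), ans) := by
        simp [solutionStepA, h0]
      have ihh := ih c (dic.insert c (dic.getD c 0 + 1)) ans (R ++ [c])
        (by simp)
        (by
          intro d
          rw [PySem.Dict.getD_insert]
          by_cases hd : d = c
          · subst hd; simp [h0, List.count_append]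
          · simp [hd, hdic, List.count_append,
              List.count_eq_zero_of_not_mem (show d ∉ [c] by simp [hd])])
        hnd
        (by
          intro d
          by_cases hd : d = c
          · subst hd
            constructor
            · intro hm; exact absurd ((hans d).mp hm) (by omega)
            · intro hm
              simp [List.count_append, hcR] at hm
          · rw [hans d, List.count_append,
              List.count_eq_zero_of_not_mem (show d ∉ [c] by simp [hd])]
            omega)
      rw [List.foldl_cons, step]
      refine ⟨ihh.1, fun d => ?_⟩
      rw [ihh.2 d]
      have : R ++ [c] ++ rlGo c cs = R ++ rlGo prev (c :: cs) := by
        simp [rlGo, hcp]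
      rw [this]
    · by_cases hcp : prev = c
      · -- same run continues: nothing changes
        have step : solutionStepA (prev, dic, ans) c = (c, dic, ans) := by
          simp [solutionStepA, h0, hcp]
        rw [List.foldl_cons, step]
        have ihh := ih c dic ans R (hcp ▸ hprev) hdic hnd hans
        refine ⟨ihh.1, fun d => ?_⟩
        rw [ihh.2 d]
        simp [rlGo, hcp]
      · -- c seen before and starts a new run: added to answer
        have hc1 : 1 ≤ R.count c := (hdic c).mp h0
        have step : solutionStepA (prev, dic, ans) c =
            (c, dic, PySem.Set.add ans c) := by
          simp [solutionStepA, h0, hcp]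
        have ihh := ih c dic (PySem.Set.add ans c) (R ++ [c])
          (by simp)
          (by
            intro d
            by_cases hd : d = c
            · subst hd
              constructor
              · intro _
                rw [List.count_append]
                have : List.count d [d] = 1 := by simp
                omega
              · intro _
                exact h0
            · rw [hdic d, List.count_append,
                List.count_eq_zero_of_not_mem (show d ∉ [c] by simp [hd])]
              omega)
          (PySem.Set.nodup_add ans c hnd)
          (by
            intro d
            rw [PySem.Set.mem_add]
            by_cases hd : d = c
            · subst hd
              have h1 : List.count d (R ++ [d]) = List.count d R + 1 := by
                simp [List.count_append]
              exact ⟨fun _ => by omega, fun _ => Or.inr rfl⟩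
            · rw [List.count_append,
                List.count_eq_zero_of_not_mem (show d ∉ [c] by simp [hd])]
              simp [hd, hans])
        rw [List.foldl_cons, step]
        refine ⟨ihh.1, fun d => ?_⟩
        rw [ihh.2 d]
        have : R ++ [c] ++ rlGo c cs = R ++ rlGo prev (c :: cs) := by
          simp [rlGo, Ne.symm hcp]
        rw [this]

-- membership in A's final answer ↔ ≥ 2 runs in the compressed string
lemma answer_char (c0 : Char) (cs : List Char) :
    ((c0 :: cs).foldl solutionStepA (c0, PySem.Dict.empty, PySem.Set.empty)).2.2.Nodup ∧
    ∀ d, d ∈ ((c0 :: cs).foldl solutionStepA (c0, PySem.Dict.empty, PySem.Set.empty)).2.2 ↔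
      2 ≤ (c0 :: rlGo c0 cs).count d := by
  have step : solutionStepA (c0, PySem.Dict.empty, PySem.Set.empty) c0 =
      (c0, PySem.Dict.empty.insert c0 1, PySem.Set.empty) := by
    simp [solutionStepA, PySem.Dict.getD_empty]
  have ihh := stepA_inv cs c0 (PySem.Dict.empty.insert c0 1) PySem.Set.empty [c0]
    (by simp)
    (by
      intro d
      rw [PySem.Dict.getD_insert]
      by_cases hd : d = c0
      · subst hd; simp
      · simp [hd, PySem.Dict.getD_empty,
          List.count_eq_zero_of_not_mem (show d ∉ [c0] by simp [hd])])
    (by simp [PySem.Set.empty])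
    (by
      intro d
      by_cases hd : d = c0
      · subst hd; simp [PySem.Set.empty]
      · simp [PySem.Set.empty,
          List.count_eq_zero_of_not_mem (show d ∉ [c0] by simp [hd])])
  rw [List.foldl_cons, step]
  exact ⟨ihh.1, fun d => by rw [ihh.2 d]; simp⟩

-- ===== VERDICT (by name: the statement is the Claim_ definition above) =====
theorem solution_spec : Claim_equal_solution := by
  intro s _ hpre
  unfold Spec_solution solution solution_alt
  have hs : s.toList ≠ [] := by
    intro h
    exact hpre (String.toList_inj.mp h)
  obtain ⟨c0, cs, hcons⟩ := List.exists_cons_of_ne_nil hs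
  rw [hcons]
  -- both sides: sorted lists of the same nodup character set
  have hruns : (cs.foldl solutionStepB (c0, [c0])).2 = c0 :: rlGo c0 cs := by
    simpa using stepB_eq cs c0 [c0]
  have hA := answer_char c0 cs
  have hkmem : ∀ d, d ∈ (PySem.Dict.keys (PySem.Dict.counter (cs.foldl solutionStepB (c0, [c0])).2)).filter
      (fun ch => 2 ≤ (PySem.Dict.counter (cs.foldl solutionStepB (c0, [c0])).2).getD ch 0) ↔
      2 ≤ (c0 :: rlGo c0 cs).count d := by
    intro d
    rw [hruns]
    simp only [List.mem_filter, PySem.Dict.keys_counter, PySem.Set.mem_ofList,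
      PySem.Dict.getD_counter, decide_eq_true_eq]
    constructor
    · intro h
      have := h.2
      exact_mod_cast this
    · intro h
      refine ⟨List.count_pos_iff.mp (by omega), by exact_mod_cast h⟩
  have hknd : ((PySem.Dict.keys (PySem.Dict.counter (cs.foldl solutionStepB (c0, [c0])).2)).filter
      (fun ch => 2 ≤ (PySem.Dict.counter (cs.foldl solutionStepB (c0, [c0])).2).getD ch 0)).Nodup :=
    (PySem.Dict.nodup_keys_counter _).filter _
  have hperm : ((c0 :: cs).foldl solutionStepA (c0, PySem.Dict.empty, PySem.Set.empty)).2.2.Perm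
      ((PySem.Dict.keys (PySem.Dict.counter (cs.foldl solutionStepB (c0, [c0])).2)).filter
        (fun ch => 2 ≤ (PySem.Dict.counter (cs.foldl solutionStepB (c0, [c0])).2).getD ch 0)) := by
    rw [List.perm_ext_iff_of_nodup hA.1 hknd]
    intro d
    rw [hA.2 d, hkmem d]
  have hsorted := PySem.List.sorted_eq_sorted_of_perm _ _ (fun (x : Char) => x)
    (fun _ _ h => h) hperm
  simp only [hsorted]
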